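-- pv_equiv track=rewrite | github.com/superzachen/usaco_practice | bronze/codeforces_tung_tung_tung.py | is_valid_sound
-- ===== SOURCE A (Python) =====
-- def is_valid_sound(p, s):
--     i = j = 0
--     while i < len(p) and j < len(s):
--         if s[j] != p[i]:
--             return False
--         j += 1
--         if j < len(s) and s[j] == p[i]:  # Double sound
--             j += 1
--         i += 1
--     return i == len(p) and j == len(s)
-- ===== SOURCE B (Python) =====
-- def _rle(x):
--     runs = []
--     i = 0
--     while i < len(x):
--         j = i + 1
--         while j < len(x) and x[j] == x[i]:
--             j += 1
--         runs.append((x[i], j - i))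
--         i = j
--     return runs
--
-- def is_valid_sound(p, s):
--     rp = _rle(p)
--     rs = _rle(s)
--     if len(rp) != len(rs):
--         return False
--     return all(cp == cs and kp == (ks + 1) // 2 for (cp, kp), (cs, ks) in zip(rp, rs))
-- ===== Notes on version B (the rewrite author's own statement) =====
-- stated objective: alternative
-- what changed: Replaced the greedy two-pointer scan (consume 1 or 2 matching s-chars per p-char) by run-length encoding both strings and comparing run lists pairwise with kp == (ks+1)//2.
import Mathlib
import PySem

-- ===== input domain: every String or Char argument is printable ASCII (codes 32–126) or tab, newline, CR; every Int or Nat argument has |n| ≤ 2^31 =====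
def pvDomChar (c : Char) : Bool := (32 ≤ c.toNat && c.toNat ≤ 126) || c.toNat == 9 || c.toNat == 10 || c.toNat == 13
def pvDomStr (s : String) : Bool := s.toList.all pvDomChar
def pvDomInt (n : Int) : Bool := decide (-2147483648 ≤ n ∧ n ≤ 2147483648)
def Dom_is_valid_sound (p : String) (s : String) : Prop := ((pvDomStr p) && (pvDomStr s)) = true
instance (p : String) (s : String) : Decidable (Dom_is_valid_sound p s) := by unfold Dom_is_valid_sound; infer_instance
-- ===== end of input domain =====

-- B replaces A's greedy two-pointer scan by run-length encoding both strings and comparing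
-- the run lists pairwise (objective: alternative algorithm of the same cost).

-- B replaces A's greedy two-pointer scan by run-length encoding both strings and comparing
-- the run lists pairwise (objective: alternative algorithm of the same cost).

-- ===== PORT A =====
-- A's while loop as recursion on i, j over the character lists (in-range indexing via getD, exact here).
def pvALoop (p s : List Char) (i j : Nat) : Bool :=
  if i < p.length ∧ j < s.length then
    if s.getD j default ≠ p.getD i default then false
    else
      pvALoop p s (i + 1)
        (if j + 1 < s.length ∧ s.getD (j + 1) default = p.getD i default then j + 1 + 1 else j + 1)
  else decide (i = p.length ∧ j = s.length)
termination_by p.length - i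

def is_valid_sound (p : String) (s : String) : Bool :=
  pvALoop p.toList s.toList 0 0

-- ===== PORT B =====
-- B's _rle: the outer loop emits one (char, run length) pair per maximal run; the inner
-- counting while loop is the takeWhile length, and advancing i to j is dropWhile.
def pvRle : List Char → List (Char × Nat)
  | [] => []
  | a :: xs =>
    (a, 1 + (xs.takeWhile (· == a)).length) :: pvRle (xs.dropWhile (· == a))
termination_by x => x.length
decreasing_by
  exact Nat.lt_succ_of_le (List.length_dropWhile_le _ _)

def is_valid_sound_alt (p : String) (s : String) : Bool :=
  let rp := pvRle p.toList
  let rs := pvRle s.toList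
  if rp.length ≠ rs.length then false
  else (rp.zip rs).all (fun x => x.1.1 == x.2.1 && x.1.2 == (x.2.2 + 1) / 2)

-- ===== PRECONDITION & SPEC =====
def Spec_is_valid_sound (p : String) (s : String) (out : Bool) : Prop := out = is_valid_sound_alt p s
instance (p : String) (s : String) (out : Bool) : Decidable (Spec_is_valid_sound p s out) := by unfold Spec_is_valid_sound; infer_instance

-- ===== CLAIM (what is proved, stated in full; the proofs are below) =====
def Claim_equal_is_valid_sound : Prop := ∀ (p : String) (s : String), Dom_is_valid_sound p s → Spec_is_valid_sound p s (is_valid_sound p s)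

-- ===== LEMMAS AND PROOFS =====

def pvChk : List Char → List Char → Bool
  | [], [] => true
  | [], _ :: _ => false
  | _ :: _, [] => false
  | a :: ps, b :: ss =>
    if b ≠ a then false
    else
      match ss with
      | [] => pvChk ps []
      | b' :: ss' => if b' = a then pvChk ps ss' else pvChk ps (b' :: ss')
termination_by ps ss => ps.length + ss.length





lemma pvChk_cons_ne (a b : Char) (ps ss : List Char) (h : b ≠ a) :
    pvChk (a :: ps) (b :: ss) = false := by
  cases ss <;> simp [pvChk, h]

lemma pvALoop_eq_chk (p s : List Char) :
    ∀ i j, i ≤ p.length → j ≤ s.length →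
      pvALoop p s i j = pvChk (p.drop i) (s.drop j) := by
  intro i j
  induction i, j using pvALoop.induct p s with
  | case1 i j h1 h2 =>
    intro hi hj
    have ep : p.getD i default = p[i]'h1.1 := List.getD_eq_getElem _ _ h1.1
    have es : s.getD j default = s[j]'h1.2 := List.getD_eq_getElem _ _ h1.2
    rw [pvALoop.eq_def, if_pos h1, if_pos h2,
      List.drop_eq_getElem_cons h1.1, List.drop_eq_getElem_cons h1.2]
    rw [ep, es] at h2
    exact (pvChk_cons_ne _ _ _ _ h2).symm
  | case2 i j h1 h2 ih =>
    intro hi hj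
    have ep : p.getD i default = p[i]'h1.1 := List.getD_eq_getElem _ _ h1.1
    have es : s.getD j default = s[j]'h1.2 := List.getD_eq_getElem _ _ h1.2
    rw [ep, es, not_not] at h2
    rw [pvALoop.eq_def, if_pos h1, if_neg (by rw [ep, es]; exact not_not_intro h2),
      List.drop_eq_getElem_cons h1.1, List.drop_eq_getElem_cons h1.2]
    rcases Nat.lt_or_ge (j + 1) s.length with hj1 | hj1
    · have es1 : s.getD (j + 1) default = s[j + 1]'hj1 := List.getD_eq_getElem _ _ hj1
      rw [List.drop_eq_getElem_cons hj1]
      simp only [pvChk]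
      rw [if_neg (not_not_intro h2)]
      by_cases hd : s[j + 1]'hj1 = p[i]'h1.1
      · have hc : j + 1 < s.length ∧ s.getD (j + 1) default = p.getD i default :=
          ⟨hj1, by rw [es1, ep]; exact hd⟩
        have ih' := ih (by omega) (by rw [dif_pos hc]; omega)
        rw [dif_pos hc] at ih'
        rw [if_pos hc, if_pos hd, ih']
      · have hc : ¬ (j + 1 < s.length ∧ s.getD (j + 1) default = p.getD i default) := by
          rw [es1, ep]; exact fun hx => hd hx.2
        have ih' := ih (by omega) (by rw [dif_neg hc]; omega)
        rw [dif_neg hc] at ih'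
        rw [if_neg hc, if_neg hd, ih', List.drop_eq_getElem_cons hj1]
    · have hc : ¬ (j + 1 < s.length ∧ s.getD (j + 1) default = p.getD i default) := by
        intro hx; omega
      have ih' := ih (by omega) (by rw [dif_neg hc]; omega)
      rw [dif_neg hc] at ih'
      rw [if_neg hc, ih', (by omega : j + 1 = s.length), List.drop_length]
      simp only [pvChk]
      rw [if_neg (not_not_intro h2)]
  | case3 i j h =>
    intro hi hj
    rw [pvALoop.eq_def, if_neg h]
    rcases Nat.lt_or_ge i p.length with hip | hip
    · have hjs : j = s.length := by omega
      rw [List.drop_eq_getElem_cons hip, hjs, List.drop_length]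
      simp only [pvChk]
      exact decide_eq_false (by omega)
    · have hip' : i = p.length := by omega
      rcases Nat.lt_or_ge j s.length with hjs | hjs
      · rw [List.drop_eq_getElem_cons hjs, hip', List.drop_length]
        simp only [pvChk]
        exact decide_eq_false (by omega)
      · have hjs' : j = s.length := by omega
        rw [hip', hjs', List.drop_length, List.drop_length]
        simp [pvChk]

def pvCmp : List (Char × Nat) → List (Char × Nat) → Bool
  | [], [] => true
  | [], _ :: _ => false
  | _ :: _, [] => false
  | x :: u, y :: v => (x.1 == y.1 && x.2 == (y.2 + 1) / 2) && pvCmp u v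

lemma pvG_eq_cmp : ∀ u v : List (Char × Nat),
    (if u.length ≠ v.length then false
     else (u.zip v).all (fun x => x.1.1 == x.2.1 && x.1.2 == (x.2.2 + 1) / 2)) = pvCmp u v := by
  intro u
  induction u with
  | nil => intro v; cases v <;> simp [pvCmp]
  | cons x u ih =>
    intro v
    cases v with
    | nil => simp [pvCmp]
    | cons y v =>
      simp only [pvCmp, List.zip_cons_cons, List.all_cons, List.length_cons]
      rw [← ih v]
      by_cases hl : u.length = v.length
      · simp [hl, Bool.and_comm, Bool.and_assoc, Bool.and_left_comm]
      · simp [hl]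

lemma pvRle_nil : pvRle [] = [] := by simp [pvRle]

lemma pvRle_cons (a : Char) (xs : List Char) :
    pvRle (a :: xs) = (a, 1 + (xs.takeWhile (· == a)).length) :: pvRle (xs.dropWhile (· == a)) := by
  simp [pvRle]

lemma pv_tw_pos (a : Char) (xs : List Char) :
    (a :: xs).takeWhile (· == a) = a :: xs.takeWhile (· == a) := by simp

lemma pv_dw_pos (a : Char) (xs : List Char) :
    (a :: xs).dropWhile (· == a) = xs.dropWhile (· == a) := by simp

lemma pv_tw_neg {c a : Char} (xs : List Char) (h : ¬ c = a) :
    (c :: xs).takeWhile (· == a) = [] := by simp [h]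

lemma pv_dw_neg {c a : Char} (xs : List Char) (h : ¬ c = a) :
    (c :: xs).dropWhile (· == a) = c :: xs := by simp [h]

lemma pvCmp_cons_cons (x y : Char × Nat) (u v : List (Char × Nat)) :
    pvCmp (x :: u) (y :: v) = ((x.1 == y.1 && x.2 == (y.2 + 1) / 2) && pvCmp u v) := by
  simp [pvCmp]

lemma pv_beq_congr (m x n y : Nat) (h : (m = x) ↔ (n = y)) : (m == x) = (n == y) := by
  rw [Bool.eq_iff_iff]; simp only [beq_iff_eq]; exact h

lemma pvCmp_cons_nil (x : Char × Nat) (u : List (Char × Nat)) : pvCmp (x :: u) [] = false := by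
  simp [pvCmp]

lemma pvCmp_nil_cons (y : Char × Nat) (v : List (Char × Nat)) : pvCmp [] (y :: v) = false := by
  simp [pvCmp]

lemma pvCmp_head_false (c c' : Char) (m n : Nat) (u v : List (Char × Nat))
    (h : ¬ (c = c' ∧ m = (n + 1) / 2)) : pvCmp ((c, m) :: u) ((c', n) :: v) = false := by
  have hh : ((c, m).1 == (c', n).1 && (c, m).2 == ((c', n).2 + 1) / 2) = false := by
    by_cases h1 : c = c'
    · have h2 : ¬ m = (n + 1) / 2 := fun h2 => h ⟨h1, h2⟩
      simp [h1, h2]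
    · simp [h1]
  rw [pvCmp_cons_cons, hh, Bool.false_and]

lemma pvCmp_head_congr (c : Char) (m n m' n' : Nat) (u v : List (Char × Nat))
    (h : (m = (n + 1) / 2) ↔ (m' = (n' + 1) / 2)) :
    pvCmp ((c, m) :: u) ((c, n) :: v) = pvCmp ((c, m') :: u) ((c, n') :: v) := by
  rw [pvCmp_cons_cons, pvCmp_cons_cons]
  simp only [beq_self_eq_true, Bool.true_and]
  congr 1
  exact pv_beq_congr _ _ _ _ h

lemma pvCmp_rle_eq_chk : ∀ ps ss : List Char, pvCmp (pvRle ps) (pvRle ss) = pvChk ps ss := by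
  intro ps ss
  induction ps, ss using pvChk.induct with
  | case1 => simp [pvRle_nil, pvCmp, pvChk]
  | case2 b ss => rw [pvRle_nil, pvRle_cons]; simp [pvCmp, pvChk]
  | case3 a ps => rw [pvRle_nil, pvRle_cons]; simp [pvCmp, pvChk]
  | case4 a ps b ss hne =>
    have hab : ¬ a = b := fun h => hne h.symm
    rw [pvRle_cons a ps, pvRle_cons b ss, pvChk_cons_ne _ _ _ _ hne]
    simp [pvCmp, hab]
  | case5 a ps b heq ih =>
    rcases not_not.mp heq with rfl
    rw [show pvChk (b :: ps) [b] = pvChk ps [] from by simp [pvChk], ← ih, pvRle_nil]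
    rcases ps with _ | ⟨c, ps2⟩
    · simp [pvRle, pvCmp]
    · by_cases hc : c = b
      · rcases hc with rfl
        simp only [pvRle_cons, pvRle_nil, pv_tw_pos, pv_dw_pos, List.takeWhile_nil,
          List.dropWhile_nil, List.length_cons, List.length_nil, pvCmp_cons_nil, pvCmp_nil_cons]
        apply pvCmp_head_false
        rintro ⟨-, h⟩
        omega
      · simp only [pvRle_cons, pvRle_nil, pv_tw_neg ps2 hc, pv_dw_neg ps2 hc, List.takeWhile_nil,
          List.dropWhile_nil, List.length_cons, List.length_nil, pvCmp_cons_nil, pvCmp_nil_cons]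
        simp [pvCmp_cons_cons, pvCmp_cons_nil]
  | case6 ps b a ss' hba ih =>
    rcases not_not.mp hba with rfl
    rw [show pvChk (b :: ps) (b :: b :: ss') = pvChk ps ss' from by simp [pvChk], ← ih]
    rcases ps with _ | ⟨c, ps2⟩
    · rcases ss' with _ | ⟨d, ss2⟩
      · simp [pvRle, pvCmp]
      · by_cases hd : d = b
        · rcases hd with rfl
          simp only [pvRle_cons, pvRle_nil, pv_tw_pos, pv_dw_pos, List.takeWhile_nil,
            List.dropWhile_nil, List.length_cons, List.length_nil, pvCmp_cons_nil, pvCmp_nil_cons]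
          apply pvCmp_head_false
          rintro ⟨-, h⟩
          omega
        · simp only [pvRle_cons, pvRle_nil, pv_tw_pos, pv_dw_pos, pv_tw_neg ss2 hd,
            pv_dw_neg ss2 hd, List.takeWhile_nil, List.dropWhile_nil, List.length_cons,
            List.length_nil, pvCmp_cons_nil, pvCmp_nil_cons]
          simp [pvCmp_cons_cons, pvCmp_nil_cons]
    · by_cases hc : c = b
      · rcases hc with rfl
        rcases ss' with _ | ⟨d, ss2⟩
        · simp only [pvRle_cons, pvRle_nil, pv_tw_pos, pv_dw_pos, List.takeWhile_nil,
            List.dropWhile_nil, List.length_cons, List.length_nil, pvCmp_cons_nil, pvCmp_nil_cons]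
          apply pvCmp_head_false
          rintro ⟨-, h⟩
          omega
        · by_cases hd : d = c
          · rcases hd with rfl
            simp only [pvRle_cons, pvRle_nil, pv_tw_pos, pv_dw_pos, List.takeWhile_nil,
              List.dropWhile_nil, List.length_cons, List.length_nil, pvCmp_cons_nil,
              pvCmp_nil_cons]
            apply pvCmp_head_congr
            omega
          · simp only [pvRle_cons, pvRle_nil, pv_tw_pos, pv_dw_pos, pv_tw_neg ss2 hd,
              pv_dw_neg ss2 hd, List.takeWhile_nil, List.dropWhile_nil, List.length_cons,
              List.length_nil, pvCmp_cons_nil, pvCmp_nil_cons]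
            trans (false : Bool)
            · apply pvCmp_head_false
              rintro ⟨-, h⟩
              omega
            · symm
              apply pvCmp_head_false
              rintro ⟨h1, -⟩
              exact hd h1.symm
      · rcases ss' with _ | ⟨d, ss2⟩
        · simp only [pvRle_cons, pvRle_nil, pv_tw_pos, pv_dw_pos, pv_tw_neg ps2 hc,
            pv_dw_neg ps2 hc, List.takeWhile_nil, List.dropWhile_nil, List.length_cons,
            List.length_nil, pvCmp_cons_nil, pvCmp_nil_cons]
          simp [pvCmp_cons_cons, pvCmp_cons_nil]
        · by_cases hd : d = b
          · rcases hd with rfl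
            simp only [pvRle_cons, pvRle_nil, pv_tw_pos, pv_dw_pos, pv_tw_neg ps2 hc,
              pv_dw_neg ps2 hc, List.takeWhile_nil, List.dropWhile_nil, List.length_cons,
              List.length_nil, pvCmp_cons_nil, pvCmp_nil_cons]
            trans (false : Bool)
            · apply pvCmp_head_false
              rintro ⟨-, h⟩
              omega
            · symm
              apply pvCmp_head_false
              rintro ⟨h1, -⟩
              exact hc h1
          · simp only [pvRle_cons, pvRle_nil, pv_tw_pos, pv_dw_pos, pv_tw_neg ps2 hc,
              pv_dw_neg ps2 hc, pv_tw_neg ss2 hd, pv_dw_neg ss2 hd, List.takeWhile_nil,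
              List.dropWhile_nil, List.length_cons, List.length_nil, pvCmp_cons_nil,
              pvCmp_nil_cons]
            simp [pvCmp_cons_cons]
  | case7 a ps b hba b' ss' hne ih =>
    rcases not_not.mp hba with rfl
    rw [show pvChk (b :: ps) (b :: b' :: ss') = pvChk ps (b' :: ss') from by simp [pvChk, hne], ← ih]
    rcases ps with _ | ⟨c, ps2⟩
    · simp only [pvRle_cons, pvRle_nil, pv_tw_neg ss' hne, pv_dw_neg ss' hne, List.takeWhile_nil,
        List.dropWhile_nil, List.length_cons, List.length_nil, pvCmp_cons_nil, pvCmp_nil_cons]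
      simp [pvCmp_cons_cons, pvCmp_nil_cons]
    · by_cases hc : c = b
      · rcases hc with rfl
        simp only [pvRle_cons, pvRle_nil, pv_tw_pos, pv_dw_pos, pv_tw_neg ss' hne,
          pv_dw_neg ss' hne, List.takeWhile_nil, List.dropWhile_nil, List.length_cons,
          List.length_nil, pvCmp_cons_nil, pvCmp_nil_cons]
        trans (false : Bool)
        · apply pvCmp_head_false
          rintro ⟨-, h⟩
          omega
        · symm
          apply pvCmp_head_false
          rintro ⟨h1, -⟩
          exact hne h1.symm
      · simp only [pvRle_cons, pvRle_nil, pv_tw_neg ps2 hc, pv_dw_neg ps2 hc,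
          pv_tw_neg ss' hne, pv_dw_neg ss' hne, List.takeWhile_nil, List.dropWhile_nil,
          List.length_cons, List.length_nil, pvCmp_cons_nil, pvCmp_nil_cons]
        simp [pvCmp_cons_cons]

-- ===== VERDICT (by name: the statement is the Claim_ definition above) =====
theorem is_valid_sound_spec : Claim_equal_is_valid_sound := by
  intro p s _
  unfold Spec_is_valid_sound is_valid_sound is_valid_sound_alt
  rw [pvALoop_eq_chk p.toList s.toList 0 0 (Nat.zero_le _) (Nat.zero_le _),
    List.drop_zero, List.drop_zero, ← pvCmp_rle_eq_chk, ← pvG_eq_cmp]
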